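-- pv_equiv track=rewrite | github.com/lovingmage/crypte | src/crypte/core.py | op_filter
-- ===== SOURCE A (Python) =====
-- def op_filter(tab, attr, attr_pred, val_pred_1, val_pred_2, zero):
--     if attr_pred > len(attr):
--         raise ValueError('Non existing attrbute.')
--     else:
--         if val_pred_1 > attr[attr_pred - 1] or val_pred_2 > attr[attr_pred - 1]:
--             raise ValueError('Attribute value out of index.')
--         if val_pred_1 > val_pred_2:
--             raise ValueError('Wrong value order.')
--         if val_pred_1 <= 0 or val_pred_2 <= 0:
--             raise ValueError('Wrong attribute value.')
--
--     filtered_tab = []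
--     idxbase = sum(attr[:attr_pred-1])
--     idx1 = idxbase + val_pred_1 - 1
--     idx2 = idxbase + val_pred_2
--         # if point query
--     if (val_pred_1 == val_pred_2):
--         for elem in tab:
--             filtered_tab.append([elem[i] if i == idx1 else zero for i in range(len(elem))])
--         return filtered_tab
--     # if range query
--     else:
--         for elem in tab:
--             filtered_tab.append([elem[i] if i >= idx1 and i < idx2 else zero for i in range(len(elem))])
--         return filtered_tab
-- ===== SOURCE B (Python) =====
-- def op_filter(tab, attr, attr_pred, val_pred_1, val_pred_2, zero):
--     if attr_pred > len(attr):
--         raise ValueError('Non existing attrbute.')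
--     if val_pred_1 > attr[attr_pred - 1] or val_pred_2 > attr[attr_pred - 1]:
--         raise ValueError('Attribute value out of index.')
--     if val_pred_1 > val_pred_2:
--         raise ValueError('Wrong value order.')
--     if val_pred_1 <= 0 or val_pred_2 <= 0:
--         raise ValueError('Wrong attribute value.')
--     idxbase = sum(attr[:attr_pred - 1])
--     idx1 = idxbase + val_pred_1 - 1
--     idx2 = idxbase + val_pred_2
--     out = []
--     for elem in tab:
--         n = len(elem)
--         a = min(max(idx1, 0), n)
--         b = min(max(idx2, a), n)
--         out.append([zero] * a + elem[a:b] + [zero] * (n - b))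
--     return out
-- ===== Notes on version B (the rewrite author's own statement) =====
-- stated objective: simpler
-- what changed: Instead of testing every column index against the window (A's per-index conditional comprehension, split into point and range branches), B builds each row by concatenating three segments -- a zero prefix, the kept slice elem[a:b], and a zero suffix -- with a single unified window; no per-element index test remains.
import Mathlib
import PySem

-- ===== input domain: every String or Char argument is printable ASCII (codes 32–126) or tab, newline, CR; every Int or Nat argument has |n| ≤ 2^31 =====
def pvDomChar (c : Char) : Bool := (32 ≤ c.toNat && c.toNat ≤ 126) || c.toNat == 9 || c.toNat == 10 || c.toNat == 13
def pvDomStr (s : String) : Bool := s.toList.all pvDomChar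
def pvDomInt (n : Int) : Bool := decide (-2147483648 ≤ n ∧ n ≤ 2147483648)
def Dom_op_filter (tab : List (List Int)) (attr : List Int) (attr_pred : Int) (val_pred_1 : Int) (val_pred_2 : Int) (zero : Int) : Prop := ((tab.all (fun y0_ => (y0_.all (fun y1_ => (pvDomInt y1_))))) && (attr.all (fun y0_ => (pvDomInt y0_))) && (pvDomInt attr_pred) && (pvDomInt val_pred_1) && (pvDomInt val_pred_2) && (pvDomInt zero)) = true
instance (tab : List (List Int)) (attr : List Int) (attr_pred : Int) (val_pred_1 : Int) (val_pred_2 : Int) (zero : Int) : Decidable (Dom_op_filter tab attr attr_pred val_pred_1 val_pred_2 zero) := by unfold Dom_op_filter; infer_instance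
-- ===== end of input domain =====

-- B keeps A's guards but builds each row as zero-prefix ++ kept slice ++ zero-suffix,
-- replacing A's per-index conditional comprehensions and point/range split (objective: simpler).

-- ===== PORT A =====
def op_filter (tab : List (List Int)) (attr : List Int) (attr_pred : Int) (val_pred_1 : Int) (val_pred_2 : Int) (zero : Int) : List (List Int) :=
  let idxbase := (PySem.List.slice attr none (some (attr_pred - 1))).sum
  let idx1 := idxbase + val_pred_1 - 1
  let idx2 := idxbase + val_pred_2
  if val_pred_1 = val_pred_2 then
    tab.foldl (fun acc elem =>
      acc ++ [(PySem.List.pyRange 0 (elem.length : Int) 1).map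
        (fun i => if i = idx1 then PySem.List.pyGetD elem i 0 else zero)]) []
  else
    tab.foldl (fun acc elem =>
      acc ++ [(PySem.List.pyRange 0 (elem.length : Int) 1).map
        (fun i => if idx1 ≤ i ∧ i < idx2 then PySem.List.pyGetD elem i 0 else zero)]) []

-- ===== PORT B =====
def op_filter_alt (tab : List (List Int)) (attr : List Int) (attr_pred : Int) (val_pred_1 : Int) (val_pred_2 : Int) (zero : Int) : List (List Int) :=
  let idxbase := (PySem.List.slice attr none (some (attr_pred - 1))).sum
  let idx1 := idxbase + val_pred_1 - 1
  let idx2 := idxbase + val_pred_2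
  tab.foldl (fun out elem =>
    let n := (elem.length : Int)
    let a := min (max idx1 0) n
    let b := min (max idx2 a) n
    out ++ [List.replicate a.toNat zero ++ PySem.List.slice elem (some a) (some b)
            ++ List.replicate (n - b).toNat zero]) []

-- ===== PRECONDITION & SPEC =====
-- Pre_ excludes exactly the inputs on which A raises ValueError/IndexError: a non-existing
-- attribute, an out-of-range attr index, predicate values above the attribute size,
-- values in the wrong order, or non-positive values.
def Pre_op_filter (tab : List (List Int)) (attr : List Int) (attr_pred : Int) (val_pred_1 : Int) (val_pred_2 : Int) (zero : Int) : Prop :=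
  attr_pred ≤ (attr.length : Int) ∧
  PySem.Raise.InRange attr.length (attr_pred - 1) ∧
  val_pred_1 ≤ PySem.List.pyGetD attr (attr_pred - 1) 0 ∧
  val_pred_2 ≤ PySem.List.pyGetD attr (attr_pred - 1) 0 ∧
  val_pred_1 ≤ val_pred_2 ∧ 1 ≤ val_pred_1
instance (tab : List (List Int)) (attr : List Int) (attr_pred : Int) (val_pred_1 : Int) (val_pred_2 : Int) (zero : Int) : Decidable (Pre_op_filter tab attr attr_pred val_pred_1 val_pred_2 zero) := by unfold Pre_op_filter; infer_instance

def pvWitness_op_filter : List (List Int) × List Int × Int × Int × Int × Int :=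
  ([[1, 2, 3, 4, 5], [6, 7, 8, 9, 10]], [2, 3], 2, 1, 2, 0)

def Spec_op_filter (tab : List (List Int)) (attr : List Int) (attr_pred : Int) (val_pred_1 : Int) (val_pred_2 : Int) (zero : Int) (out : List (List Int)) : Prop := out = op_filter_alt tab attr attr_pred val_pred_1 val_pred_2 zero
instance (tab : List (List Int)) (attr : List Int) (attr_pred : Int) (val_pred_1 : Int) (val_pred_2 : Int) (zero : Int) (out : List (List Int)) : Decidable (Spec_op_filter tab attr attr_pred val_pred_1 val_pred_2 zero out) := by unfold Spec_op_filter; infer_instance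

-- ===== CLAIM (what is proved, stated in full; the proofs are below) =====
def Claim_equal_op_filter : Prop := ∀ (tab : List (List Int)) (attr : List Int) (attr_pred : Int) (val_pred_1 : Int) (val_pred_2 : Int) (zero : Int), Dom_op_filter tab attr attr_pred val_pred_1 val_pred_2 zero → Pre_op_filter tab attr attr_pred val_pred_1 val_pred_2 zero → Spec_op_filter tab attr attr_pred val_pred_1 val_pred_2 zero (op_filter tab attr attr_pred val_pred_1 val_pred_2 zero)

-- ===== LEMMAS AND PROOFS =====

-- per row: B's three-segment row equals the generalized conditional comprehension,
-- provided the window is nonempty as an interval (idx1 < idx2)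
lemma row_eq (elem : List Int) (idx1 idx2 zero : Int) (h : idx1 < idx2) :
    (List.replicate (min (max idx1 0) (elem.length : Int)).toNat zero
      ++ PySem.List.slice elem (some (min (max idx1 0) (elem.length : Int)))
           (some (min (max idx2 (min (max idx1 0) (elem.length : Int))) (elem.length : Int)))
      ++ List.replicate ((elem.length : Int)
            - min (max idx2 (min (max idx1 0) (elem.length : Int))) (elem.length : Int)).toNat zero)
    = (PySem.List.pyRange 0 (elem.length : Int) 1).map
        (fun i => if idx1 ≤ i ∧ i < idx2 then PySem.List.pyGetD elem i 0 else zero) := by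
  set n := elem.length with hn
  set a := min (max idx1 0) (n : Int) with ha
  set b := min (max idx2 a) (n : Int) with hb
  have ha0 : 0 ≤ a := by omega
  have hb0 : 0 ≤ b := by omega
  have hab : a ≤ b := by omega
  have hbn : b ≤ (n : Int) := by omega
  have hsl : PySem.List.slice elem (some a) (some b)
      = (elem.drop a.toNat).take (b.toNat - a.toNat) := by
    rw [PySem.List.slice_toNat] <;> omega
  rw [hsl]
  apply List.ext_getElem
  · simp [PySem.List.length_pyRange_one]
    omega
  · intro j h1 h2
    have hj : j < n := by simp [PySem.List.length_pyRange_one] at h2; omega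
    have hrhs : ((PySem.List.pyRange 0 (n : Int) 1).map
        (fun i => if idx1 ≤ i ∧ i < idx2 then PySem.List.pyGetD elem i 0 else zero))[j]'h2
        = if idx1 ≤ (j : Int) ∧ (j : Int) < idx2 then elem[j]'hj else zero := by
      rw [List.getElem_map, PySem.List.getElem_pyRange_one]
      simp only [zero_add]
      by_cases hc : idx1 ≤ (j : Int) ∧ (j : Int) < idx2
      · rw [if_pos hc, if_pos hc, PySem.List.pyGetD_natCast, List.getD_eq_getElem _ 0 hj]
      · rw [if_neg hc, if_neg hc]
    rw [hrhs]
    have hlen12 : (List.replicate a.toNat zero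
        ++ (elem.drop a.toNat).take (b.toNat - a.toNat)).length = b.toNat := by
      simp [List.length_take, List.length_drop]
      omega
    by_cases hjb : j < b.toNat
    · rw [List.getElem_append_left (by rw [hlen12]; exact hjb)]
      by_cases hja : j < a.toNat
      · rw [List.getElem_append_left (by simpa using hja), List.getElem_replicate,
          if_neg (by omega)]
      · rw [List.getElem_append_right (by simpa using hja)]
        simp only [List.length_replicate]
        rw [List.getElem_take, List.getElem_drop, if_pos (by omega)]
        congr 1
        omega
    · rw [List.getElem_append_right (by rw [hlen12]; omega), List.getElem_replicate,
        if_neg (by omega)]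

-- ===== VERDICT (by name: the statement is the Claim_ definition above) =====
theorem op_filter_spec : Claim_equal_op_filter := by
  intro tab attr attr_pred val_pred_1 val_pred_2 zero _ hpre
  obtain ⟨_, _, _, _, h12, h1⟩ := hpre
  unfold Spec_op_filter op_filter op_filter_alt
  simp only []
  set idxbase := (PySem.List.slice attr none (some (attr_pred - 1))).sum with hbase
  by_cases heq : val_pred_1 = val_pred_2
  · rw [if_pos heq]
    rw [PySem.List.foldl_append_singleton_eq_map, PySem.List.foldl_append_singleton_eq_map]
    apply List.map_congr_left
    intro elem _
    rw [row_eq _ _ _ _ (by omega)]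
    apply List.map_congr_left
    intro i _
    by_cases hi : i = idxbase + val_pred_1 - 1
    · rw [if_pos hi, if_pos (by omega)]
    · rw [if_neg hi, if_neg (by omega)]
  · rw [if_neg heq]
    rw [PySem.List.foldl_append_singleton_eq_map, PySem.List.foldl_append_singleton_eq_map]
    apply List.map_congr_left
    intro elem _
    rw [row_eq _ _ _ _ (by omega)]
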